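-- pv_equiv track=rewrite | github.com/kipnz/Naive-Bayes-python | Naive_Bayes.py | get_total_word_counts
-- ===== SOURCE A (Python) =====
-- def get_total_word_counts(mydict):
--     #this gives an alphabetically ordered dictionary of the words total counts
--     word_total = {}
--     for element in mydict:
--         for word in mydict[element]:
--             if word not in word_total:
--                 word_total[word] = mydict[element][word]
--             else:
--                 word_total[word] += mydict[element][word]
--     word_total = dict(sorted(word_total.items()))
--     return word_total
-- ===== SOURCE B (Python) =====
-- def get_total_word_counts(mydict):
--     # alphabetically ordered totals: flatten all (word, count) pairs, sort by word,
--     # then sum each consecutive run of equal words (already in alphabetical order).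
--     pairs = [(w, c) for inner in mydict.values() for (w, c) in inner.items()]
--     pairs.sort(key=lambda p: p[0])
--     result = {}
--     i, n = 0, len(pairs)
--     while i < n:
--         w = pairs[i][0]
--         total = pairs[i][1]
--         i += 1
--         while i < n and pairs[i][0] == w:
--             total += pairs[i][1]
--             i += 1
--         result[w] = total
--     return result
-- ===== Notes on version B (the rewrite author's own statement) =====
-- stated objective: alternative
-- what changed: Instead of accumulating a word->total dict over nested loops and then sorting its items, B flattens all (word,count) pairs into one list, sorts it by word, and sums each consecutive run of equal words, so the result is built already in alphabetical order with no final sort of the dict.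
import Mathlib
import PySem

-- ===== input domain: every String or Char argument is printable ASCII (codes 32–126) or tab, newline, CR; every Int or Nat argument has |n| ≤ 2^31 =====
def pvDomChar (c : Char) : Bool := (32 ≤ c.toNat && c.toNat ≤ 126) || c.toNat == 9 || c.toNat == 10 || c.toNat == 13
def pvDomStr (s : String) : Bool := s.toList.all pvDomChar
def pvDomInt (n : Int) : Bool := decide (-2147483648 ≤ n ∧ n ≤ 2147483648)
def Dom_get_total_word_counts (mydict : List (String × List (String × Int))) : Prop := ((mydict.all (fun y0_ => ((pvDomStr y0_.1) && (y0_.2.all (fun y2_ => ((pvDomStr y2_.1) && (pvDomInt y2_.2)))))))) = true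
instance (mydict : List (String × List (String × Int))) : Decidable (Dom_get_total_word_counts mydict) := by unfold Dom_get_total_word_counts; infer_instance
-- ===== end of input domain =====

-- B builds the same alphabetical word->total dict by sort-then-group over the flattened
-- pairs instead of A's dict accumulation followed by a sort; same return value everywhere.

-- ===== PORT A =====
-- one inner-loop step: 'if word not in word_total: word_total[word] = c else: word_total[word] += c'
def gtwStep (d : PySem.Dict String Int) (p : String × Int) : PySem.Dict String Int :=
  if d.contains p.1 then d.modify p.1 0 (· + p.2) else d.insert p.1 p.2

-- 'for word in mydict[element]' iterates the inner dict's (key, value) pairs, here the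
-- association list itself; 'sorted(word_total.items())' compares (word, count) tuples, and
-- since the dict's words are unique this is exactly sorting by the word (key = fst).
def get_total_word_counts (mydict : List (String × List (String × Int))) : List (String × Int) :=
  let word_total := mydict.foldl (fun d e => e.2.foldl gtwStep d) PySem.Dict.empty
  PySem.List.sorted word_total.items (fun p => p.1) false

-- ===== PORT B =====
-- the two nested while loops of Source B: one result entry per consecutive run of equal words
def gtwGroups : List (String × Int) → List (String × Int)
  | [] => []
  | (w, c) :: rest =>
    (w, c + ((rest.takeWhile (fun p => p.1 == w)).map (·.2)).sum) ::
      gtwGroups (rest.dropWhile (fun p => p.1 == w))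
termination_by l => l.length
decreasing_by
  simp only [List.length_cons]
  exact Nat.lt_succ_of_le (List.length_dropWhile_le _ _)

def get_total_word_counts_alt (mydict : List (String × List (String × Int))) : List (String × Int) :=
  let pairs := (mydict.map (·.2)).flatten
  gtwGroups (PySem.List.sorted pairs (fun p => p.1) false)

-- ===== PRECONDITION & SPEC =====
def Spec_get_total_word_counts (mydict : List (String × List (String × Int))) (out : List (String × Int)) : Prop := out = get_total_word_counts_alt mydict
instance (mydict : List (String × List (String × Int))) (out : List (String × Int)) : Decidable (Spec_get_total_word_counts mydict out) := by unfold Spec_get_total_word_counts; infer_instance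

-- ===== CLAIM (what is proved, stated in full; the proofs are below) =====
def Claim_equal_get_total_word_counts : Prop := ∀ (mydict : List (String × List (String × Int))), Dom_get_total_word_counts mydict → Spec_get_total_word_counts mydict (get_total_word_counts mydict)

-- ===== LEMMAS AND PROOFS =====

-- total count of word w in a pair list
def gtwSum (l : List (String × Int)) (w : String) : Int :=
  ((l.filter (fun p => p.1 == w)).map (·.2)).sum

lemma foldl_nested_eq_flatten (mydict : List (String × List (String × Int)))
    (d : PySem.Dict String Int) :
    mydict.foldl (fun d e => e.2.foldl gtwStep d) d
      = ((mydict.map (·.2)).flatten).foldl gtwStep d := by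
  induction mydict generalizing d with
  | nil => rfl
  | cons e t ih => simp [List.foldl_append, ih]

lemma getD_gtwStep (d : PySem.Dict String Int) (p : String × Int) (w : String) :
    (gtwStep d p).getD w 0 = if w = p.1 then d.getD w 0 + p.2 else d.getD w 0 := by
  unfold gtwStep
  by_cases hc : d.contains p.1 = true
  · rw [if_pos hc, PySem.Dict.getD_modify]
    split_ifs with hw
    · rw [hw]
    · rfl
  · rw [if_neg hc]
    have hc' : d.contains p.1 = false := by simpa using hc
    by_cases hw : w = p.1
    · subst hw
      rw [PySem.Dict.getD_insert_self, if_pos rfl,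
        PySem.Dict.getD_of_not_contains d (0 : Int) hc', zero_add]
    · rw [PySem.Dict.getD_insert_of_ne d p.2 0 hw, if_neg hw]

lemma gtwSum_cons (p : String × Int) (t : List (String × Int)) (w : String) :
    gtwSum (p :: t) w = (if p.1 = w then p.2 else 0) + gtwSum t w := by
  unfold gtwSum
  rw [List.filter_cons]
  by_cases h : p.1 = w
  · simp [h]
  · simp [h, show ¬((p.1 == w) = true) by simpa using h]

lemma getD_foldl_gtwStep (l : List (String × Int)) (d : PySem.Dict String Int) (w : String) :
    (l.foldl gtwStep d).getD w 0 = d.getD w 0 + gtwSum l w := by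
  induction l generalizing d with
  | nil => simp [gtwSum]
  | cons p t ih =>
    rw [List.foldl_cons, ih, getD_gtwStep, gtwSum_cons]
    by_cases hw : w = p.1
    · rw [if_pos hw, if_pos hw.symm]; ring
    · rw [if_neg hw, if_neg (fun h => hw h.symm), zero_add]

lemma keys_foldl_gtwStep (l : List (String × Int)) (d : PySem.Dict String Int)
    (hnd : d.keys.Nodup) :
    (l.foldl gtwStep d).keys.Nodup ∧
    (∀ w, w ∈ (l.foldl gtwStep d).keys ↔ w ∈ d.keys ∨ w ∈ l.map (·.1)) := by
  induction l generalizing d with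
  | nil => simp [hnd]
  | cons p t ih =>
    have hstep : (gtwStep d p).keys.Nodup ∧
        (∀ w, w ∈ (gtwStep d p).keys ↔ w ∈ d.keys ∨ w = p.1) := by
      unfold gtwStep
      by_cases hc : d.contains p.1 = true
      · rw [if_pos hc]
        have hmem : p.1 ∈ d.keys := (PySem.Dict.contains_iff_mem_keys _ _).mp hc
        have hk : (d.modify p.1 0 (· + p.2)).keys = d.keys := by
          rw [PySem.Dict.keys_modify, PySem.Dict.keys_insert_of_contains _ _ hc]
        rw [hk]
        exact ⟨hnd, fun w => ⟨Or.inl, fun h => h.elim id (fun h => h ▸ hmem)⟩⟩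
      · rw [if_neg hc]
        have hc' : d.contains p.1 = false := by simpa using hc
        have hnm : p.1 ∉ d.keys := fun h => hc ((PySem.Dict.contains_iff_mem_keys _ _).mpr h)
        rw [PySem.Dict.keys_insert_of_not_contains d p.2 hc']
        constructor
        · have hdis : ∀ a ∈ d.keys, ¬ a = p.1 := fun a ha h => hnm (h ▸ ha)
          simp [List.nodup_append, hnd]
          exact hdis
        · intro w; simp
    obtain ⟨ih1, ih2⟩ := ih (gtwStep d p) hstep.1
    refine ⟨ih1, fun w => ?_⟩
    simp only [List.foldl_cons, ih2, hstep.2, List.map_cons, List.mem_cons]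
    tauto

lemma dropWhile_head_false {α : Type} (q : α → Bool) (l : List α) (y : α) (t : List α)
    (h : l.dropWhile q = y :: t) : q y = false := by
  induction l with
  | nil => simp at h
  | cons a l ih =>
    by_cases hq : q a = true
    · exact ih (by simpa [List.dropWhile_cons, hq] using h)
    · simp only [List.dropWhile_cons, hq, Bool.false_eq_true, reduceIte] at h
      obtain ⟨rfl, -⟩ := List.cons.inj h
      simpa using hq

lemma groups_spec (l : List (String × Int)) (h : l.Pairwise (fun a b => a.1 ≤ b.1)) :
    (gtwGroups l).Pairwise (fun a b => a.1 < b.1) ∧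
    (∀ w, w ∈ (gtwGroups l).map (·.1) ↔ w ∈ l.map (·.1)) ∧
    (∀ p ∈ gtwGroups l, p.2 = gtwSum l p.1) := by
  induction l using gtwGroups.induct with
  | case1 => simp [gtwGroups, gtwSum]
  | case2 w c rest ih =>
    rw [List.pairwise_cons] at h
    obtain ⟨hle, hpw⟩ := h
    set q : String × Int → Bool := fun p => p.1 == w with hq
    have hsplit : rest.takeWhile q ++ rest.dropWhile q = rest := List.takeWhile_append_dropWhile
    have hsame : ∀ p ∈ rest.takeWhile q, p.1 = w := by
      intro p hp
      have := List.mem_takeWhile_imp hp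
      simpa [hq] using this
    have hsub : ∀ p ∈ rest.dropWhile q, p ∈ rest :=
      fun p hp => (List.dropWhile_sublist q).mem hp
    have hpw' : (rest.dropWhile q).Pairwise (fun a b => a.1 ≤ b.1) :=
      hpw.sublist (List.dropWhile_sublist q)
    have hgt : ∀ p ∈ rest.dropWhile q, w < p.1 := by
      cases hr : rest.dropWhile q with
      | nil => simp
      | cons y t =>
        have hy : y.1 ≠ w := by
          have := dropWhile_head_false q rest y t hr
          simpa [hq] using this
        have hylt : w < y.1 :=
          lt_of_le_of_ne (hle y (hsub y (by simp [hr]))) (Ne.symm hy)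
        intro p hp
        rcases List.mem_cons.mp hp with rfl | hp
        · exact hylt
        · have := (List.pairwise_cons.mp (hr ▸ hpw')).1 p hp
          exact lt_of_lt_of_le hylt this
    obtain ⟨ih1, ih2, ih3⟩ := ih hpw'
    have hsumrest : ∀ x, w < x → gtwSum ((w, c) :: rest) x = gtwSum (rest.dropWhile q) x := by
      intro x hx
      unfold gtwSum
      rw [← hsplit, List.filter_cons]
      have h1 : ¬ ((w : String) == x) = true := by
        simp only [beq_iff_eq]; exact fun he => absurd (he ▸ hx) (lt_irrefl _)
      rw [List.filter_append]
      have h2 : (rest.takeWhile q).filter (fun p => p.1 == x) = [] := by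
        apply List.filter_eq_nil_iff.mpr
        intro p hp
        simp only [beq_iff_eq]
        exact fun he => absurd ((hsame p hp) ▸ he ▸ hx) (lt_irrefl _)
      simp [h1, h2]
    have hsumw : gtwSum ((w, c) :: rest) w
        = c + (((rest.takeWhile q).map (·.2)).sum) := by
      unfold gtwSum
      rw [← hsplit, List.filter_cons, List.filter_append]
      have h2 : (rest.takeWhile q).filter (fun p => p.1 == w) = rest.takeWhile q :=
        List.filter_eq_self.mpr (fun p hp => by simp [hsame p hp])
      have h3 : (rest.dropWhile q).filter (fun p => p.1 == w) = [] :=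
        List.filter_eq_nil_iff.mpr (fun p hp => by
          simp only [beq_iff_eq]
          exact fun he => absurd (he ▸ hgt p hp) (lt_irrefl _))
      simp [h2, h3]
    refine ⟨?_, ?_, ?_⟩
    · rw [gtwGroups, List.pairwise_cons]
      refine ⟨fun b hb => ?_, ih1⟩
      have hb1 : b.1 ∈ (rest.dropWhile q).map (·.1) :=
        (ih2 b.1).mp (List.mem_map.mpr ⟨b, hb, rfl⟩)
      obtain ⟨p, hp, hpe⟩ := List.mem_map.mp hb1
      exact hpe ▸ hgt p hp
    · intro x
      rw [gtwGroups]
      simp only [List.map_cons, List.mem_cons]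
      constructor
      · rintro (rfl | hx)
        · exact Or.inl rfl
        · have hx' := (ih2 x).mp hx
          obtain ⟨p, hp, rfl⟩ := List.mem_map.mp hx'
          exact Or.inr (List.mem_map.mpr ⟨p, hsub p hp, rfl⟩)
      · rintro (rfl | hx)
        · exact Or.inl rfl
        · obtain ⟨p, hp, rfl⟩ := List.mem_map.mp hx
          rw [← hsplit] at hp
          rcases List.mem_append.mp hp with hp | hp
          · exact Or.inl (hsame p hp)
          · exact Or.inr ((ih2 p.1).mpr (List.mem_map.mpr ⟨p, hp, rfl⟩))
    · intro p hp
      rw [gtwGroups] at hp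
      rcases List.mem_cons.mp hp with rfl | hp
      · exact hsumw.symm
      · have hx : w < p.1 := by
          have hp1 : p.1 ∈ (rest.dropWhile q).map (·.1) :=
            (ih2 p.1).mp (List.mem_map.mpr ⟨p, hp, rfl⟩)
          obtain ⟨r, hr, hre⟩ := List.mem_map.mp hp1
          exact hre ▸ hgt r hr
        rw [hsumrest p.1 hx]
        exact ih3 p hp

-- ===== VERDICT (by name: the statement is the Claim_ definition above) =====
theorem get_total_word_counts_spec : Claim_equal_get_total_word_counts := by
  intro mydict _
  unfold Spec_get_total_word_counts get_total_word_counts get_total_word_counts_alt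
  simp only [foldl_nested_eq_flatten]
  set pairs := (mydict.map (·.2)).flatten with hpairs
  set sp := PySem.List.sorted pairs (fun p => p.1) false with hsp
  set dA := pairs.foldl gtwStep PySem.Dict.empty with hdA
  have hspPerm : sp.Perm pairs := PySem.List.sorted_perm ..
  have hsppw : sp.Pairwise (fun a b => a.1 ≤ b.1) := PySem.List.sorted_pairwise ..
  obtain ⟨hgpw, hgmem, hgval⟩ := groups_spec sp hsppw
  obtain ⟨hknd, hkmem⟩ :=
    keys_foldl_gtwStep pairs PySem.Dict.empty PySem.Dict.nodup_keys_empty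
  rw [← hdA] at hknd hkmem
  have hitems : dA.items = dA.keys.map (fun k => (k, gtwSum pairs k)) := by
    rw [PySem.Dict.items_eq_map_keys dA hknd 0]
    refine List.map_congr_left (fun k _ => ?_)
    rw [hdA, getD_foldl_gtwStep, PySem.Dict.getD_empty, zero_add]
  have hsumperm : ∀ x, gtwSum sp x = gtwSum pairs x := fun x =>
    List.Perm.sum_eq ((hspPerm.filter _).map (·.2))
  have hg : gtwGroups sp = ((gtwGroups sp).map (·.1)).map (fun k => (k, gtwSum pairs k)) := by
    rw [List.map_map]
    conv_lhs => rw [← List.map_id (gtwGroups sp)]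
    refine List.map_congr_left (fun p hp => ?_)
    show p = (p.1, gtwSum pairs p.1)
    rw [← hsumperm p.1, ← hgval p hp]
  have hkeysBnd : ((gtwGroups sp).map (·.1)).Nodup := by
    have hlt : ((gtwGroups sp).map (·.1)).Pairwise (· < ·) := List.pairwise_map.mpr hgpw
    exact hlt.imp ne_of_lt
  have hkeysperm : ((gtwGroups sp).map (·.1)).Perm dA.keys := by
    rw [List.perm_ext_iff_of_nodup hkeysBnd hknd]
    intro x
    rw [hgmem x, hkmem x]
    constructor
    · intro hx
      exact Or.inr ((hspPerm.map (·.1)).mem_iff.mp hx)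
    · rintro (hx | hx)
      · simp [PySem.Dict.keys_empty] at hx
      · exact (hspPerm.map (·.1)).mem_iff.mpr hx
  have hperm : (gtwGroups sp).Perm dA.items := by
    rw [hitems]
    conv_lhs => rw [hg]
    exact hkeysperm.map _
  exact PySem.List.sorted_eq_of_perm_of_pairwise_lt _ _ _ hperm hgpw
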